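-- pv_equiv track=rewrite | github.com/Dimitrije-Jimmy/AdventOfCode2024 | day9/main2.py | find_free_spans
-- ===== SOURCE A (Python) =====
-- def find_free_spans(data):
--     """
--     Identifies all free spans in the disk.
--
--     Args:
--         data (list): The list representing disk blocks.
--
--     Returns:
--         list of tuples: Each tuple contains (start_index, length).
--     """
--     free_spans = []
--     in_free_span = False
--     start_index = 0
--     for i, block in enumerate(data):
--         if block == '.' and not in_free_span:
--             in_free_span = True
--             start_index = i
--         elif block != '.' and in_free_span:
--             in_free_span = False
--             free_spans.append((start_index, i - start_index))
--     # Handle the last free span if the disk ends with free space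
--     if in_free_span:
--         free_spans.append((start_index, len(data) - start_index))
--     return free_spans
-- ===== SOURCE B (Python) =====
-- from itertools import groupby
--
-- def find_free_spans(data):
--     """Group the disk into maximal runs of equal blocks; emit (start, len) for '.' runs."""
--     spans = []
--     i = 0
--     for key, grp in groupby(data):
--         n = sum(1 for _ in grp)
--         if key == '.':
--             spans.append((i, n))
--         i += n
--     return spans
-- ===== Notes on version B (the rewrite author's own statement) =====
-- stated objective: idiomatic
-- what changed: Replaced the boolean in_free_span state machine with trailing-span fixup by an itertools.groupby pass that splits the disk into maximal equal runs, keeps a running index, and emits (index, length) for '.' runs.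
import Mathlib
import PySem

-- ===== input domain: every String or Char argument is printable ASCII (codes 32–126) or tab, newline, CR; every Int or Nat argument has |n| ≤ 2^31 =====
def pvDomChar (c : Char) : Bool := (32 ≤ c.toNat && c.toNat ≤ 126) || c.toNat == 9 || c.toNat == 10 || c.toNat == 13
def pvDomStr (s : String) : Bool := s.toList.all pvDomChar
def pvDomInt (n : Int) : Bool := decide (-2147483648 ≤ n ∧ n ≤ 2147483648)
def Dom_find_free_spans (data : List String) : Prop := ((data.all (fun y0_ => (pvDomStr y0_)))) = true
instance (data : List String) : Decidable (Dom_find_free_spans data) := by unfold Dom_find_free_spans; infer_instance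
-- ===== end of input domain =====

-- B replaces A's boolean state machine (with trailing-span fixup) by a group-runs-then-filter pass (idiomatic, same cost).
-- ===== PORT A =====
def find_free_spans (data : List String) : List (Int × Int) :=
  let st := (PySem.List.enumerate data 0).foldl
    (fun (st : List (Int × Int) × Bool × Int) (p : Int × String) =>
      let (spans, in_free, start) := st
      if p.2 == "." && !in_free then (spans, true, p.1)
      else if p.2 != "." && in_free then (spans ++ [(start, p.1 - start)], false, start)
      else st)
    ([], false, 0)
  if st.2.1 then st.1 ++ [(st.2.2, (data.length : Int) - st.2.2)] else st.1

-- ===== PORT B =====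
-- groupby(data) = maximal runs of equal elements: take the head's run with takeWhile/dropWhile.
def find_free_spans_alt (data : List String) : List (Int × Int) :=
  goAlt data 0
where
  goAlt : List String → Int → List (Int × Int)
  | [], _ => []
  | x :: xs, i =>
    let n : Int := ((xs.takeWhile (· == x)).length : Int) + 1
    let tail := goAlt (xs.dropWhile (· == x)) (i + n)
    if x == "." then (i, n) :: tail else tail
  termination_by l _ => l.length
  decreasing_by
    simpa using Nat.lt_succ_of_le (List.length_dropWhile_le (· == x) xs)

-- ===== PRECONDITION & SPEC =====
def Spec_find_free_spans (data : List String) (out : List (Int × Int)) : Prop := out = find_free_spans_alt data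
instance (data : List String) (out : List (Int × Int)) : Decidable (Spec_find_free_spans data out) := by unfold Spec_find_free_spans; infer_instance

-- ===== CLAIM (what is proved, stated in full; the proofs are below) =====
def Claim_equal_find_free_spans : Prop := ∀ (data : List String), Dom_find_free_spans data → Spec_find_free_spans data (find_free_spans data)

-- ===== LEMMAS AND PROOFS =====

-- A's loop body as a named step function (definitionally the lambda inside find_free_spans).
def stepA (st : List (Int × Int) × Bool × Int) (p : Int × String) : List (Int × Int) × Bool × Int :=
  let (spans, in_free, start) := st
  if p.2 == "." && !in_free then (spans, true, p.1)
  else if p.2 != "." && in_free then (spans ++ [(start, p.1 - start)], false, start)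
  else st

-- A's loop as structural recursion carrying the index.
def loopA : List String → Int → (List (Int × Int) × Bool × Int) → List (Int × Int) × Bool × Int
  | [], _, st => st
  | x :: xs, i, st => loopA xs (i + 1) (stepA st (i, x))

-- A's trailing fixup.
def finA (st : List (Int × Int) × Bool × Int) (e : Int) : List (Int × Int) :=
  if st.2.1 then st.1 ++ [(st.2.2, e - st.2.2)] else st.1

-- The result of B from an open '.'-span started at s, resumed at index j.
def dotsB (xs : List String) (j s : Int) : List (Int × Int) :=
  let k : Int := ((xs.takeWhile (· == ".")).length : Int)
  (s, j + k - s) :: find_free_spans_alt.goAlt (xs.dropWhile (· == ".")) (j + k)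

theorem foldl_enum_loopA (xs : List String) (i : Int)
    (st : List (Int × Int) × Bool × Int) :
    (PySem.List.enumerate xs i).foldl stepA st = loopA xs i st := by
  induction xs generalizing i st with
  | nil => rfl
  | cons x xs ih =>
    simp [PySem.List.enumerate_cons, List.foldl_cons, loopA, ih]

theorem goAlt_skip (x : String) (hx : x ≠ ".") (xs : List String) (i : Int) :
    find_free_spans_alt.goAlt (x :: xs) i = find_free_spans_alt.goAlt xs (i + 1) := by
  have hb : (x == ".") = false := by simp [hx]
  cases xs with
  | nil => simp [find_free_spans_alt.goAlt, hb]
  | cons y ys =>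
    by_cases hy : y = x
    · subst hy
      rw [find_free_spans_alt.goAlt, find_free_spans_alt.goAlt]
      simp only [List.takeWhile_cons, List.dropWhile_cons, beq_self_eq_true, if_true,
        List.length_cons, hb, if_false, Bool.false_eq_true]
      congr 1
      push_cast
      ring
    · have hyb : (y == x) = false := by simp [hy]
      rw [find_free_spans_alt.goAlt]
      simp only [List.takeWhile_cons, List.dropWhile_cons, hyb, Bool.false_eq_true, if_false,
        List.length_nil, hb]
      norm_num

theorem loopA_main (xs : List String) (i : Int) (spans : List (Int × Int)) (s : Int) :
    finA (loopA xs i (spans, false, s)) (i + (xs.length : Int))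
        = spans ++ find_free_spans_alt.goAlt xs i
    ∧ finA (loopA xs i (spans, true, s)) (i + (xs.length : Int))
        = spans ++ dotsB xs i s := by
  induction xs generalizing i spans s with
  | nil =>
    simp [loopA, finA, find_free_spans_alt.goAlt, dotsB]
  | cons x xs ih =>
    have hlen : ∀ j : Int, j + ((List.length (x :: xs) : Int)) = (j + 1) + (xs.length : Int) := by
      intro j; push_cast [List.length_cons]; ring
    by_cases hx : x = "."
    · subst hx
      constructor
      · rw [loopA, show stepA (spans, false, s) (i, ".") = (spans, true, i) from by simp [stepA],
          hlen i, (ih (i + 1) spans i).2]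
        congr 1
        rw [find_free_spans_alt.goAlt, dotsB]
        simp only [beq_self_eq_true, if_true]
        congr 2 <;> ring
      · rw [loopA, show stepA (spans, true, s) (i, ".") = (spans, true, s) from by simp [stepA],
          hlen i, (ih (i + 1) spans s).2]
        congr 1
        rw [dotsB, dotsB]
        simp only [List.takeWhile_cons, List.dropWhile_cons, beq_self_eq_true, if_true,
          List.length_cons]
        congr 2 <;> push_cast <;> ring
    · have hb : (x == ".") = false := by simp [hx]
      constructor
      · rw [loopA, show stepA (spans, false, s) (i, x) = (spans, false, s) from by
            simp [stepA, hb],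
          hlen i, (ih (i + 1) spans s).1, goAlt_skip x hx]
      · rw [loopA, show stepA (spans, true, s) (i, x) = (spans ++ [(s, i - s)], false, s) from by
            simp [stepA, hb, hx],
          hlen i, (ih (i + 1) (spans ++ [(s, i - s)]) s).1, dotsB]
        simp only [List.takeWhile_cons, List.dropWhile_cons, hb, Bool.false_eq_true, if_false,
          List.length_nil, List.append_assoc]
        congr 1
        rw [goAlt_skip x hx]
        norm_num

-- ===== VERDICT (by name: the statement is the Claim_ definition above) =====
theorem find_free_spans_spec : Claim_equal_find_free_spans := by
  intro data _
  show find_free_spans data = find_free_spans_alt data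
  have h := (loopA_main data 0 [] 0).1
  simp only [zero_add] at h
  unfold find_free_spans
  rw [show (fun (st : List (Int × Int) × Bool × Int) (p : Int × String) =>
      let (spans, in_free, start) := st
      if p.2 == "." && !in_free then (spans, true, p.1)
      else if p.2 != "." && in_free then (spans ++ [(start, p.1 - start)], false, start)
      else st) = stepA from rfl, foldl_enum_loopA]
  show finA (loopA data 0 ([], false, 0)) (data.length : Int) = _
  rw [h]
  rfl
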